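-- pv_equiv track=rewrite | github.com/yfh667/generic | draw/basic_show/rectangle_new.py | fanxiangfeng
-- ===== SOURCE A (Python) =====
-- def cyclic_width(ys, N):
--     if not ys:
--         return 0
--     ys = sorted(set(ys))
--     gaps = []
--     for i in range(1, len(ys)):
--         gaps.append(ys[i] - ys[i-1])
--     # 跨越环首尾
--     gaps.append((ys[0] + N) - ys[-1])
--     maxgap = max(gaps)
--     return N - maxgap + 1
--
-- def fanxiangfeng(sats, P, N):
--     xs = [sid // N for sid in sats]
--     ys = [sid % N for sid in sats]
--
--     left = min(xs)
--     right = max(xs)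
--     block_info = [(None, None), (None, None)]
--
--     # 判断是否两块
--     if left == 0 and right == P - 1:
--         # --------左侧块--------
--         leftgroup = []
--         x = left
--         while x in xs:
--             leftgroup.append(x)
--             x += 1
--         # 统计左块包络
--         leftys = [sid % N for sid in sats if (sid // N) in leftgroup]
--         left_width = cyclic_width(leftys, N)
--         left_length = leftgroup[-1] - leftgroup[0] + 1 if leftgroup else 0
--         block_info[0] = (left_length, left_width)
--
--         # --------右侧块--------
--         rightgroup = []
--         x = right
--         while x in xs:
--             rightgroup.append(x)
--             x -= 1
--         rightys = [sid % N for sid in sats if (sid // N) in rightgroup]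
--         right_width = cyclic_width(rightys, N)
--         right_length = rightgroup[0] - rightgroup[-1] + 1 if rightgroup else 0
--         block_info[1] = (right_length, right_width)
--
--     else:
--         # 只有一块，取所有点
--         w = max(xs) - min(xs) + 1
--         h = cyclic_width(ys, N)
--         block_info[0] = (w, h)
--         block_info[1] = (None, None)
--
--     return block_info  # [(块1长, 宽), (块2长, 宽)]
-- ===== SOURCE B (Python) =====
-- def cyclic_width(ys, N):
--     if not ys:
--         return 0
--     ys = sorted(set(ys))
--     gaps = []
--     for i in range(1, len(ys)):
--         gaps.append(ys[i] - ys[i-1])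
--     gaps.append((ys[0] + N) - ys[-1])
--     maxgap = max(gaps)
--     return N - maxgap + 1
--
--
-- def _run(cols, step):
--     # maximal consecutive prefix of cols advancing by `step`
--     run = [cols[0]]
--     for c in cols[1:]:
--         if c != run[-1] + step:
--             break
--         run.append(c)
--     return run
--
--
-- def fanxiangfeng(sats, P, N):
--     # index once: column -> list of its ys
--     colys = {}
--     for sid in sats:
--         colys.setdefault(sid // N, []).append(sid % N)
--     cols = sorted(colys)
--     left, right = cols[0], cols[-1]
--     if left == 0 and right == P - 1:
--         leftrun = _run(cols, 1)
--         rightrun = _run(cols[::-1], -1)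
--         leftys = [y for c in leftrun for y in colys[c]]
--         rightys = [y for c in rightrun for y in colys[c]]
--         return [(leftrun[-1] - leftrun[0] + 1, cyclic_width(leftys, N)),
--                 (rightrun[0] - rightrun[-1] + 1, cyclic_width(rightys, N))]
--     else:
--         allys = [y for ylist in colys.values() for y in ylist]
--         return [(right - left + 1, cyclic_width(allys, N)), (None, None)]
-- ===== Notes on version B (the rewrite author's own statement) =====
-- stated objective: alternative
-- what changed: B builds a column->ys dict in one pass over sats and sorts the distinct columns once, then finds each block as the maximal consecutive prefix of the sorted column list (and of its reverse) and gathers the block's ys from the dict, instead of A's per-step list-membership probes and a full filter of sats per block.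
import Mathlib
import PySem

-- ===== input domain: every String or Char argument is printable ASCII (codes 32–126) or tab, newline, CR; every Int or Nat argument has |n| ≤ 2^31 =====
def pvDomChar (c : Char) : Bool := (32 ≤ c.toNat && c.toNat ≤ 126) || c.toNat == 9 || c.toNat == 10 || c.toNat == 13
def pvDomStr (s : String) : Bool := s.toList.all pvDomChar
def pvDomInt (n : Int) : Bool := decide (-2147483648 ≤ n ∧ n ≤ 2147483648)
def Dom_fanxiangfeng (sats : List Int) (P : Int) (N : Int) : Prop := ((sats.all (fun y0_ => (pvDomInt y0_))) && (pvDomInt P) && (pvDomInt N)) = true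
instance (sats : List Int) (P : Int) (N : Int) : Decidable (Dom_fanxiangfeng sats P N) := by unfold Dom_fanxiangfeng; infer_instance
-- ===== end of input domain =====

-- B re-indexes the satellites once into a column→ys dict and scans the sorted distinct
-- columns for the consecutive runs, instead of A's repeated list-membership probes and
-- whole-list filters per block (objective: alternative algorithm, index-then-gather).


-- shared module helper cyclic_width (identical in Source A and Source B), literal port
def cyclicWidth (ys : List Int) (N : Int) : Int :=
  if ys.isEmpty then 0
  else
    let ys' := PySem.List.sorted (PySem.Set.ofList ys) (fun x => x) false
    let gaps := (PySem.List.pyRange 1 (ys'.length : Int) 1).foldl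
      (fun acc i => acc ++ [PySem.List.pyGetD ys' i 0 - PySem.List.pyGetD ys' (i-1) 0]) []
    let gaps := gaps ++ [(PySem.List.pyGetD ys' 0 0 + N) - PySem.List.pyGetD ys' (-1) 0]
    match PySem.List.max? gaps (fun x => x) with
    | some maxgap => N - maxgap + 1
    | none => 0   -- unreachable: gaps is never empty

-- ===== PORT A =====
-- A's `while x in xs: ... x += 1` loop; fuel xs.length + 1 is enough for the loop to
-- reach its exit test (the collected values are distinct members of xs)
def runUpGo (xs : List Int) : Nat → Int → List Int → List Int
  | 0, _, acc => acc.reverse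
  | fuel+1, x, acc => if xs.contains x then runUpGo xs fuel (x+1) (x :: acc) else acc.reverse

def runDownGo (xs : List Int) : Nat → Int → List Int → List Int
  | 0, _, acc => acc.reverse
  | fuel+1, x, acc => if xs.contains x then runDownGo xs fuel (x-1) (x :: acc) else acc.reverse

def fanxiangfeng (sats : List Int) (P : Int) (N : Int) : List (Option Int × Option Int) :=
  let xs := sats.map (fun sid => PySem.Int.floordiv sid N)
  let ys := sats.map (fun sid => PySem.Int.mod sid N)
  match PySem.List.min? xs (fun x => x), PySem.List.max? xs (fun x => x) with
  | some left, some right =>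
    if left = 0 ∧ right = P - 1 then
      let leftgroup := runUpGo xs (xs.length + 1) left []
      let leftys := (sats.filter (fun sid => leftgroup.contains (PySem.Int.floordiv sid N))).map
        (fun sid => PySem.Int.mod sid N)
      let left_width := cyclicWidth leftys N
      let left_length := if leftgroup.isEmpty then (0:Int)
        else PySem.List.pyGetD leftgroup (-1) 0 - PySem.List.pyGetD leftgroup 0 0 + 1
      let rightgroup := runDownGo xs (xs.length + 1) right []
      let rightys := (sats.filter (fun sid => rightgroup.contains (PySem.Int.floordiv sid N))).map
        (fun sid => PySem.Int.mod sid N)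
      let right_width := cyclicWidth rightys N
      let right_length := if rightgroup.isEmpty then (0:Int)
        else PySem.List.pyGetD rightgroup 0 0 - PySem.List.pyGetD rightgroup (-1) 0 + 1
      [(some left_length, some left_width), (some right_length, some right_width)]
    else
      let w := (PySem.List.max? xs (fun x => x)).getD 0 - (PySem.List.min? xs (fun x => x)).getD 0 + 1
      [(some w, some (cyclicWidth ys N)), (none, none)]
  | _, _ => []   -- unreachable under Pre_: min([]) raises ValueError

-- ===== PORT B =====
-- Source B's _run: maximal consecutive (by `step`) prefix
def runPrefix (step : Int) (c : Int) : List Int → List Int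
  | [] => [c]
  | d :: rest => if d = c + step then c :: runPrefix step d rest else [c]

def fanxiangfeng_alt (sats : List Int) (P : Int) (N : Int) : List (Option Int × Option Int) :=
  let colys := sats.foldl
    (fun d sid => d.modify (PySem.Int.floordiv sid N) [] (fun l => l ++ [PySem.Int.mod sid N]))
    PySem.Dict.empty
  let cols := PySem.List.sorted colys.keys (fun x => x) false
  match cols with
  | [] => []   -- unreachable under Pre_: cols[0] raises IndexError
  | c0 :: rest =>
    let left := c0
    let right := PySem.List.pyGetD cols (-1) 0
    if left = 0 ∧ right = P - 1 then
      let leftrun := runPrefix 1 c0 rest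
      let rightrun := match cols.reverse with
        | [] => []
        | d0 :: drest => runPrefix (-1) d0 drest
      let leftys := leftrun.flatMap (fun c => colys.getD c [])
      let rightys := rightrun.flatMap (fun c => colys.getD c [])
      [(some (PySem.List.pyGetD leftrun (-1) 0 - PySem.List.pyGetD leftrun 0 0 + 1),
        some (cyclicWidth leftys N)),
       (some (PySem.List.pyGetD rightrun 0 0 - PySem.List.pyGetD rightrun (-1) 0 + 1),
        some (cyclicWidth rightys N))]
    else
      let allys := colys.values.flatMap (fun l => l)
      [(some (right - left + 1), some (cyclicWidth allys N)), (none, none)]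

-- ===== PRECONDITION & SPEC =====
-- Pre_ excludes the inputs where Python A raises: N = 0 (ZeroDivisionError in sid // N)
-- and sats = [] (ValueError in min([])).
def Pre_fanxiangfeng (sats : List Int) (P : Int) (N : Int) : Prop := sats ≠ [] ∧ N ≠ 0
instance (sats : List Int) (P : Int) (N : Int) : Decidable (Pre_fanxiangfeng sats P N) := by
  unfold Pre_fanxiangfeng; infer_instance

def pvWitness_fanxiangfeng : List Int × Int × Int := ([0, 5], 2, 3)

def Spec_fanxiangfeng (sats : List Int) (P : Int) (N : Int) (out : List (Option Int × Option Int)) : Prop := out = fanxiangfeng_alt sats P N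
instance (sats : List Int) (P : Int) (N : Int) (out : List (Option Int × Option Int)) : Decidable (Spec_fanxiangfeng sats P N out) := by unfold Spec_fanxiangfeng; infer_instance

-- ===== CLAIM (what is proved, stated in full; the proofs are below) =====
def Claim_equal_fanxiangfeng : Prop := ∀ (sats : List Int) (P : Int) (N : Int), Dom_fanxiangfeng sats P N → Pre_fanxiangfeng sats P N → Spec_fanxiangfeng sats P N (fanxiangfeng sats P N)

-- ===== LEMMAS AND PROOFS =====

-- the integer interval [c, c+1, …, e] (empty if e < c)
def intSeq (c e : Int) : List Int :=
  if h : c ≤ e then c :: intSeq (c+1) e else []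
termination_by (e + 1 - c).toNat
decreasing_by all_goals omega

-- the integer interval [c, c-1, …, e] (empty if c < e)
def decSeq (c e : Int) : List Int :=
  if h : e ≤ c then c :: decSeq (c-1) e else []
termination_by (c + 1 - e).toNat
decreasing_by all_goals omega

theorem intSeq_nil {c e : Int} (h : e < c) : intSeq c e = [] := by
  rw [intSeq]; simp [show ¬ c ≤ e by omega]
theorem intSeq_cons {c e : Int} (h : c ≤ e) : intSeq c e = c :: intSeq (c+1) e := by
  rw [intSeq]; simp [h]
theorem decSeq_nil {c e : Int} (h : c < e) : decSeq c e = [] := by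
  rw [decSeq]; simp [show ¬ e ≤ c by omega]
theorem decSeq_cons {c e : Int} (h : e ≤ c) : decSeq c e = c :: decSeq (c-1) e := by
  rw [decSeq]; simp [h]

theorem mem_intSeq {c e x : Int} : x ∈ intSeq c e ↔ c ≤ x ∧ x ≤ e := by
  by_cases h : c ≤ e
  · rw [intSeq_cons h]
    constructor
    · intro hx
      rcases List.mem_cons.mp hx with rfl | hx
      · omega
      · have := (mem_intSeq (c := c+1) (e := e)).mp hx; omega
    · intro ⟨h1, h2⟩
      by_cases hc : x = c
      · simp [hc]
      · exact List.mem_cons.mpr (Or.inr ((mem_intSeq).mpr (by omega)))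
  · rw [intSeq_nil (by omega)]; simp; omega
termination_by (e + 1 - c).toNat
decreasing_by all_goals omega

theorem mem_decSeq {c e x : Int} : x ∈ decSeq c e ↔ e ≤ x ∧ x ≤ c := by
  by_cases h : e ≤ c
  · rw [decSeq_cons h]
    constructor
    · intro hx
      rcases List.mem_cons.mp hx with rfl | hx
      · omega
      · have := (mem_decSeq (c := c-1) (e := e)).mp hx; omega
    · intro ⟨h1, h2⟩
      by_cases hc : x = c
      · simp [hc]
      · exact List.mem_cons.mpr (Or.inr ((mem_decSeq).mpr (by omega)))
  · rw [decSeq_nil (by omega)]; simp; omega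
termination_by (c + 1 - e).toNat
decreasing_by all_goals omega

theorem length_intSeq {c e : Int} : (intSeq c e).length = (e + 1 - c).toNat := by
  by_cases h : c ≤ e
  · rw [intSeq_cons h, List.length_cons, length_intSeq]; omega
  · rw [intSeq_nil (by omega)]; simp; omega
termination_by (e + 1 - c).toNat
decreasing_by all_goals omega

theorem length_decSeq {c e : Int} : (decSeq c e).length = (c + 1 - e).toNat := by
  by_cases h : e ≤ c
  · rw [decSeq_cons h, List.length_cons, length_decSeq]; omega
  · rw [decSeq_nil (by omega)]; simp; omega
termination_by (c + 1 - e).toNat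
decreasing_by all_goals omega

theorem pairwise_intSeq {c e : Int} : (intSeq c e).Pairwise (· < ·) := by
  by_cases h : c ≤ e
  · rw [intSeq_cons h]
    refine List.pairwise_cons.mpr ⟨?_, pairwise_intSeq⟩
    intro x hx
    have := mem_intSeq.mp hx; omega
  · rw [intSeq_nil (by omega)]; exact List.Pairwise.nil
termination_by (e + 1 - c).toNat
decreasing_by all_goals omega

theorem pairwise_decSeq {c e : Int} : (decSeq c e).Pairwise (· > ·) := by
  by_cases h : e ≤ c
  · rw [decSeq_cons h]
    refine List.pairwise_cons.mpr ⟨?_, pairwise_decSeq⟩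
    intro x hx
    have := mem_decSeq.mp hx; omega
  · rw [decSeq_nil (by omega)]; exact List.Pairwise.nil
termination_by (c + 1 - e).toNat
decreasing_by all_goals omega

theorem nodup_length_le (l1 l2 : List Int) (h : l1.Nodup) (hs : l1 ⊆ l2) :
    l1.length ≤ l2.length := by
  calc l1.length = l1.toFinset.card := by rw [List.toFinset_card_of_nodup h]
  _ ≤ l2.toFinset.card := Finset.card_le_card (by intro x hx; simp at hx ⊢; exact hs hx)
  _ ≤ l2.length := l2.toFinset_card_le

-- A's upward while-loop computes the interval [c, e] whenever e ends the run and
-- the fuel dominates the run length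
theorem runUpGo_spec (xs : List Int) (e : Int) :
    ∀ (fuel : Nat) (c : Int) (acc : List Int), c ≤ e + 1 →
    (∀ i, c ≤ i → i ≤ e → xs.contains i = true) → xs.contains (e+1) = false →
    (e + 1 - c).toNat < fuel →
    runUpGo xs fuel c acc = acc.reverse ++ intSeq c e := by
  intro fuel
  induction fuel with
  | zero => intro c acc _ _ _ hf; omega
  | succ f ih =>
    intro c acc hce hall hend hf
    by_cases hc : c ≤ e
    · have hmem : xs.contains c = true := hall c le_rfl hc
      rw [runUpGo, hmem]
      simp only [if_true]
      rw [ih (c+1) (c :: acc) (by omega) (fun i h1 h2 => hall i (by omega) h2) hend (by omega)]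
      rw [intSeq_cons hc]
      simp
    · have hc' : c = e + 1 := by omega
      subst hc'
      rw [runUpGo, hend]
      rw [intSeq_nil (show e < e+1 by omega)]; simp

theorem runDownGo_spec (xs : List Int) (e : Int) :
    ∀ (fuel : Nat) (c : Int) (acc : List Int), e - 1 ≤ c →
    (∀ i, e ≤ i → i ≤ c → xs.contains i = true) → xs.contains (e-1) = false →
    (c + 1 - e).toNat < fuel →
    runDownGo xs fuel c acc = acc.reverse ++ decSeq c e := by
  intro fuel
  induction fuel with
  | zero => intro c acc _ _ _ hf; omega
  | succ f ih =>
    intro c acc hce hall hend hf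
    by_cases hc : e ≤ c
    · have hmem : xs.contains c = true := hall c hc le_rfl
      rw [runDownGo, hmem]
      simp only [if_true]
      rw [ih (c-1) (c :: acc) (by omega) (fun i h1 h2 => hall i h1 (by omega)) hend (by omega)]
      rw [decSeq_cons hc]
      simp
    · have hc' : c = e - 1 := by omega
      subst hc'
      rw [runDownGo, hend]
      rw [decSeq_nil (show e - 1 < e by omega)]; simp

-- B's consecutive-prefix scan over a strictly increasing list realises a maximal run
theorem runPrefix_up_spec :
    ∀ (rest : List Int) (c0 : Int), (c0 :: rest).Pairwise (· < ·) →
    ∃ e, runPrefix 1 c0 rest = intSeq c0 e ∧ c0 ≤ e ∧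
      (∀ i, c0 ≤ i → i ≤ e → i ∈ c0 :: rest) ∧ (e + 1) ∉ c0 :: rest := by
  intro rest
  induction rest with
  | nil =>
    intro c0 _
    refine ⟨c0, ?_, le_rfl, ?_, ?_⟩
    · rw [runPrefix, intSeq_cons le_rfl, intSeq_nil (by omega)]
    · intro i h1 h2
      have hi : i = c0 := by omega
      simp [hi]
    · simp
  | cons d rest' ih =>
    intro c0 hp
    by_cases hd : d = c0 + 1
    · subst hd
      obtain ⟨e, hr, hle, hmem, hnot⟩ := ih (c0+1) (List.pairwise_cons.mp hp).2
      refine ⟨e, ?_, by omega, ?_, ?_⟩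
      · rw [runPrefix, if_pos rfl, hr, intSeq_cons (show c0 ≤ e by omega)]
      · intro i h1 h2
        by_cases hic : i = c0
        · simp [hic]
        · exact List.mem_cons_of_mem _ (hmem i (by omega) h2)
      · intro hcon
        rcases List.mem_cons.mp hcon with heq | htail
        · omega
        · exact hnot htail
    · have hlt : ∀ x ∈ d :: rest', c0 < x := (List.pairwise_cons.mp hp).1
      have hdgt : c0 + 2 ≤ d := by have := hlt d (by simp); omega
      have hrest : ∀ x ∈ rest', d < x :=
        (List.pairwise_cons.mp (List.pairwise_cons.mp hp).2).1
      refine ⟨c0, ?_, le_rfl, ?_, ?_⟩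
      · rw [runPrefix, if_neg (show ¬ d = c0 + 1 by omega),
          intSeq_cons le_rfl, intSeq_nil (by omega)]
      · intro i h1 h2
        have hi : i = c0 := by omega
        simp [hi]
      · intro hcon
        rcases List.mem_cons.mp hcon with heq | htail
        · omega
        · rcases List.mem_cons.mp htail with heq | h3
          · omega
          · have := hrest _ h3; omega

theorem runPrefix_down_spec :
    ∀ (rest : List Int) (c0 : Int), (c0 :: rest).Pairwise (· > ·) →
    ∃ e, runPrefix (-1) c0 rest = decSeq c0 e ∧ e ≤ c0 ∧
      (∀ i, e ≤ i → i ≤ c0 → i ∈ c0 :: rest) ∧ (e - 1) ∉ c0 :: rest := by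
  intro rest
  induction rest with
  | nil =>
    intro c0 _
    refine ⟨c0, ?_, le_rfl, ?_, ?_⟩
    · rw [runPrefix, decSeq_cons le_rfl, decSeq_nil (by omega)]
    · intro i h1 h2
      have hi : i = c0 := by omega
      simp [hi]
    · simp
  | cons d rest' ih =>
    intro c0 hp
    by_cases hd : d = c0 + -1
    · subst hd
      obtain ⟨e, hr, hle, hmem, hnot⟩ := ih (c0 + -1) (List.pairwise_cons.mp hp).2
      refine ⟨e, ?_, by omega, ?_, ?_⟩
      · rw [runPrefix, if_pos rfl, hr, decSeq_cons (show e ≤ c0 by omega)]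
        have he : c0 + -1 = c0 - 1 := by ring
        rw [he]
      · intro i h1 h2
        by_cases hic : i = c0
        · simp [hic]
        · exact List.mem_cons_of_mem _ (hmem i h1 (by omega))
      · intro hcon
        rcases List.mem_cons.mp hcon with heq | htail
        · omega
        · exact hnot htail
    · have hlt : ∀ x ∈ d :: rest', x < c0 := (List.pairwise_cons.mp hp).1
      have hdgt : d ≤ c0 - 2 := by have := hlt d (by simp); omega
      have hrest : ∀ x ∈ rest', x < d :=
        (List.pairwise_cons.mp (List.pairwise_cons.mp hp).2).1
      refine ⟨c0, ?_, le_rfl, ?_, ?_⟩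
      · rw [runPrefix, if_neg (show ¬ d = c0 + -1 by omega),
          decSeq_cons le_rfl, decSeq_nil (by omega)]
      · intro i h1 h2
        have hi : i = c0 := by omega
        simp [hi]
      · intro hcon
        rcases List.mem_cons.mp hcon with heq | htail
        · omega
        · rcases List.mem_cons.mp htail with heq | h3
          · omega
          · have := hrest _ h3; omega

-- cyclic_width depends only on the set of its first argument
theorem cyclicWidth_congr (l1 l2 : List Int) (N : Int) (h : ∀ x, x ∈ l1 ↔ x ∈ l2) :
    cyclicWidth l1 N = cyclicWidth l2 N := by
  by_cases h1 : l1 = []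
  · subst h1
    have h2 : l2 = [] := by
      apply List.eq_nil_iff_forall_not_mem.mpr
      intro x hx
      exact (List.not_mem_nil (a := x)) ((h x).mpr hx)
    subst h2; rfl
  · have h2 : l2 ≠ [] := by
      intro hc; subst hc
      apply h1
      apply List.eq_nil_iff_forall_not_mem.mpr
      intro x hx
      exact (List.not_mem_nil (a := x)) ((h x).mp hx)
    have hperm : (PySem.Set.ofList l1).Perm (PySem.Set.ofList l2) := by
      rw [List.perm_ext_iff_of_nodup (PySem.Set.nodup_ofList l1) (PySem.Set.nodup_ofList l2)]
      intro a
      rw [PySem.Set.mem_ofList, PySem.Set.mem_ofList]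
      exact h a
    have hs : PySem.List.sorted (PySem.Set.ofList l1) (fun x => x) false
        = PySem.List.sorted (PySem.Set.ofList l2) (fun x => x) false :=
      PySem.List.sorted_eq_sorted_of_perm _ _ _ (fun a b hab => hab) hperm
    unfold cyclicWidth
    simp only [List.isEmpty_iff, h1, h2, hs]


theorem colys_getD (sats : List Int) (N c : Int) :
    (sats.foldl (fun d sid => d.modify (PySem.Int.floordiv sid N) []
        (fun l => l ++ [PySem.Int.mod sid N])) PySem.Dict.empty).getD c []
    = ((sats.filter (fun sid => PySem.Int.floordiv sid N == c)).map
        (fun sid => PySem.Int.mod sid N)) := by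
  have h1 : sats.foldl (fun d sid => d.modify (PySem.Int.floordiv sid N) []
        (fun l => l ++ [PySem.Int.mod sid N])) PySem.Dict.empty
      = (sats.map (fun sid => (PySem.Int.floordiv sid N, PySem.Int.mod sid N))).foldl
        (fun d p => d.modify p.1 [] (fun l => l ++ [p.2])) PySem.Dict.empty := by
    rw [List.foldl_map]
  rw [h1, PySem.Dict.getD_foldl_modify_append]
  simp [List.filter_map]
  rfl

theorem colys_keys (sats : List Int) (N : Int) :
    (sats.foldl (fun d sid => d.modify (PySem.Int.floordiv sid N) []
        (fun l => l ++ [PySem.Int.mod sid N])) PySem.Dict.empty).keys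
    = PySem.Set.ofList (sats.map (fun sid => PySem.Int.floordiv sid N)) := by
  rw [PySem.Dict.keys_foldl_modify_key]
  rfl

theorem colys_keys_nodup (sats : List Int) (N : Int) :
    (sats.foldl (fun d sid => d.modify (PySem.Int.floordiv sid N) []
        (fun l => l ++ [PySem.Int.mod sid N])) PySem.Dict.empty).keys.Nodup := by
  rw [colys_keys]
  exact PySem.Set.nodup_ofList _

-- ===== VERDICT (by name: the statement is the Claim_ definition above) =====
theorem fanxiangfeng_spec : Claim_equal_fanxiangfeng := by
  intro sats P N _ hpre
  obtain ⟨hne, hN⟩ := hpre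
  unfold Spec_fanxiangfeng fanxiangfeng fanxiangfeng_alt
  simp only []
  have hkeys := colys_keys sats N
  have hnodup := colys_keys_nodup sats N
  have hgetD := colys_getD sats N
  set xs := sats.map (fun sid => PySem.Int.floordiv sid N) with hxs
  set ys := sats.map (fun sid => PySem.Int.mod sid N) with hys
  set D := sats.foldl (fun d sid => d.modify (PySem.Int.floordiv sid N) []
      (fun l => l ++ [PySem.Int.mod sid N])) PySem.Dict.empty with hD
  set cols := PySem.List.sorted D.keys (fun x => x) false with hcols
  have hxsne : xs ≠ [] := by simpa [hxs] using hne
  have hofne : PySem.Set.ofList xs ≠ [] := by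
    obtain ⟨s, hs⟩ := List.exists_mem_of_ne_nil _ hxsne
    exact List.ne_nil_of_mem ((PySem.Set.mem_ofList _ _).mpr hs)
  have hcolsne : cols ≠ [] := by
    rw [hcols, hkeys]
    intro hcon
    exact hofne ((PySem.List.sorted_eq_nil_iff _ _ _).mp hcon)
  obtain ⟨c0, rest, hc⟩ := List.exists_cons_of_ne_nil hcolsne
  have hrevne := List.reverse_ne_nil_iff.mpr hcolsne
  obtain ⟨d0, drest, hrev⟩ := List.exists_cons_of_ne_nil hrevne
  have hpw : cols.Pairwise (· < ·) := by
    rw [hcols, hkeys]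
    exact PySem.List.sorted_ofList_pairwise_lt _
  have hmemcols : ∀ x, x ∈ cols ↔ x ∈ xs := by
    intro x
    rw [hcols, PySem.List.mem_sorted, hkeys, PySem.Set.mem_ofList]
  have hlast : PySem.List.pyGetD cols (-1) 0 = d0 := by
    rw [PySem.List.pyGetD_neg_one cols 0 hcolsne, List.getLast_eq_head_reverse]
    simp [hrev]
  -- the head of cols is min(xs), the last is max(xs)
  have hd0mem : d0 ∈ cols := by
    rw [← List.mem_reverse, hrev]; exact List.mem_cons_self
  have hc0le : ∀ y ∈ cols, c0 ≤ y := by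
    intro y hy
    rw [hc] at hy hpw
    rcases List.mem_cons.mp hy with rfl | hy
    · exact le_rfl
    · exact le_of_lt (List.rel_of_pairwise_cons hpw hy)
  have hd0ge : ∀ y ∈ cols, y ≤ d0 := by
    intro y hy
    have hpwr : cols.reverse.Pairwise (· > ·) := by
      rw [List.pairwise_reverse]; exact hpw
    rw [← List.mem_reverse, hrev] at hy
    rw [hrev] at hpwr
    rcases List.mem_cons.mp hy with rfl | hy
    · exact le_rfl
    · exact le_of_lt (List.rel_of_pairwise_cons hpwr hy)
  rcases hminE : PySem.List.min? xs (fun x => x) with _ | leftv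
  · exact absurd ((PySem.List.min?_eq_none_iff _ _).mp hminE) hxsne
  rcases hmaxE : PySem.List.max? xs (fun x => x) with _ | rightv
  · exact absurd ((PySem.List.max?_eq_none_iff _ _).mp hmaxE) hxsne
  have hleftv : leftv = c0 := by
    have h1 : leftv ∈ xs := PySem.List.min?_mem hminE
    have h2 : c0 ∈ xs := (hmemcols c0).mp (by rw [hc]; exact List.mem_cons_self)
    have h3 := PySem.List.min?_isMin hminE c0 h2
    have h4 := hc0le leftv ((hmemcols leftv).mpr h1)
    omega
  have hrightv : rightv = d0 := by
    have h1 : rightv ∈ xs := PySem.List.max?_mem hmaxE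
    have h2 : d0 ∈ xs := (hmemcols d0).mp hd0mem
    have h3 := PySem.List.max?_isMax hmaxE d0 h2
    have h4 := hd0ge rightv ((hmemcols rightv).mpr h1)
    omega
  rw [hc]
  simp only [← hc]
  rw [hlast, hleftv, hrightv]
  simp only [hrev]
  -- run decompositions
  obtain ⟨eL, hrunB, hleL, hmemL, hnotL⟩ := runPrefix_up_spec rest c0 (hc ▸ hpw)
  have hpwr : cols.reverse.Pairwise (· > ·) := by
    rw [List.pairwise_reverse]; exact hpw
  obtain ⟨eR, hrunBR, hleR, hmemR, hnotR⟩ := runPrefix_down_spec drest d0 (hrev ▸ hpwr)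
  have hmemLcols : ∀ i, c0 ≤ i → i ≤ eL → i ∈ xs := by
    intro i h1 h2
    exact (hmemcols i).mp (hc ▸ hmemL i h1 h2)
  have hnotLxs : (eL + 1) ∉ xs := by
    intro hcon
    exact hnotL (hc ▸ (hmemcols _).mpr hcon)
  have hmemRcols : ∀ i, eR ≤ i → i ≤ d0 → i ∈ xs := by
    intro i h1 h2
    have := hmemR i h1 h2
    rw [← hrev, List.mem_reverse] at this
    exact (hmemcols i).mp this
  have hnotRxs : (eR - 1) ∉ xs := by
    intro hcon
    apply hnotR
    rw [← hrev, List.mem_reverse]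
    exact (hmemcols _).mpr hcon
  have hgroupL : runUpGo xs (xs.length + 1) c0 [] = intSeq c0 eL := by
    have hsub : intSeq c0 eL ⊆ xs := by
      intro x hx
      have := mem_intSeq.mp hx
      exact hmemLcols x this.1 this.2
    have hlen := nodup_length_le (intSeq c0 eL) xs
      (List.Pairwise.imp (fun h => ne_of_lt h) pairwise_intSeq) hsub
    rw [length_intSeq] at hlen
    rw [runUpGo_spec xs eL (xs.length + 1) c0 [] (by omega)
      (fun i h1 h2 => List.contains_iff_mem.mpr (hmemLcols i h1 h2))
      (by simpa [List.contains_iff_mem] using hnotLxs)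
      (by omega)]
    simp
  have hgroupR : runDownGo xs (xs.length + 1) d0 [] = decSeq d0 eR := by
    have hsub : decSeq d0 eR ⊆ xs := by
      intro x hx
      have := mem_decSeq.mp hx
      exact hmemRcols x this.1 this.2
    have hlen := nodup_length_le (decSeq d0 eR) xs
      (List.Pairwise.imp (fun h => ne_of_gt h) pairwise_decSeq) hsub
    rw [length_decSeq] at hlen
    rw [runDownGo_spec xs eR (xs.length + 1) d0 [] (by omega)
      (fun i h1 h2 => List.contains_iff_mem.mpr (hmemRcols i h1 h2))
      (by simpa [List.contains_iff_mem] using hnotRxs)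
      (by omega)]
    simp
  rw [hgroupL, hgroupR, hrunB, hrunBR]
  have hLem : (intSeq c0 eL).isEmpty = false := by rw [intSeq_cons hleL]; rfl
  have hRem : (decSeq d0 eR).isEmpty = false := by rw [decSeq_cons hleR]; rfl
  rw [hLem, hRem]
  simp only [Bool.false_eq_true, if_false]
  split_ifs with hcond
  · -- two blocks
    have hLys : cyclicWidth ((sats.filter (fun sid =>
          (intSeq c0 eL).contains (PySem.Int.floordiv sid N))).map
            (fun sid => PySem.Int.mod sid N)) N
        = cyclicWidth ((intSeq c0 eL).flatMap (fun c => D.getD c [])) N := by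
      apply cyclicWidth_congr
      intro y
      simp only [List.mem_map, List.mem_filter, List.mem_flatMap, hgetD,
        List.contains_iff_mem, beq_iff_eq]
      constructor
      · rintro ⟨sid, ⟨hsid, hkm⟩, rfl⟩
        exact ⟨PySem.Int.floordiv sid N, hkm, sid, ⟨hsid, rfl⟩, rfl⟩
      · rintro ⟨c, hcm, sid, ⟨hsid, hfc⟩, rfl⟩
        exact ⟨sid, ⟨hsid, hfc ▸ hcm⟩, rfl⟩
    have hRys : cyclicWidth ((sats.filter (fun sid =>
          (decSeq d0 eR).contains (PySem.Int.floordiv sid N))).map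
            (fun sid => PySem.Int.mod sid N)) N
        = cyclicWidth ((decSeq d0 eR).flatMap (fun c => D.getD c [])) N := by
      apply cyclicWidth_congr
      intro y
      simp only [List.mem_map, List.mem_filter, List.mem_flatMap, hgetD,
        List.contains_iff_mem, beq_iff_eq]
      constructor
      · rintro ⟨sid, ⟨hsid, hkm⟩, rfl⟩
        exact ⟨PySem.Int.floordiv sid N, hkm, sid, ⟨hsid, rfl⟩, rfl⟩
      · rintro ⟨c, hcm, sid, ⟨hsid, hfc⟩, rfl⟩
        exact ⟨sid, ⟨hsid, hfc ▸ hcm⟩, rfl⟩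
    rw [hLys, hRys]
  · -- one block
    have hall : cyclicWidth ys N = cyclicWidth (D.values.flatMap (fun l => l)) N := by
      apply cyclicWidth_congr
      intro y
      rw [PySem.Dict.values_eq_map_keys D hnodup []]
      simp only [hys, List.mem_map, List.mem_flatMap, hgetD, hkeys,
        PySem.Set.mem_ofList,]
      constructor
      · rintro ⟨sid, hsid, rfl⟩
        exact ⟨(sats.filter (fun s => PySem.Int.floordiv s N == PySem.Int.floordiv sid N)).map
            (fun s => PySem.Int.mod s N),
          ⟨PySem.Int.floordiv sid N, List.mem_map.mpr ⟨sid, hsid, rfl⟩, rfl⟩,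
          by
            simp only [List.mem_map, List.mem_filter, beq_iff_eq]
            exact ⟨sid, ⟨hsid, rfl⟩, rfl⟩⟩
      · rintro ⟨l, ⟨k, hk, rfl⟩, hyl⟩
        simp only [List.mem_map, List.mem_filter, beq_iff_eq] at hyl
        obtain ⟨sid, ⟨hsid, _⟩, rfl⟩ := hyl
        exact ⟨sid, hsid, rfl⟩
    rw [hall]
    simp
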